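-- pv_equiv track=rewrite | github.com/BrettRey/erdos-problem-993 | scripts/frankenstein_pair_scan.py | add_shifted
-- ===== SOURCE A (Python) =====
-- def add_shifted(a: list[int], b: list[int]) -> list[int]:
--     size = max(len(a), len(b) + 1)
--     out = [0] * size
--     for i, v in enumerate(a):
--         out[i] += v
--     for i, v in enumerate(b):
--         out[i + 1] += v
--     while len(out) > 1 and out[-1] == 0:
--         out.pop()
--     return out
-- ===== SOURCE B (Python) =====
-- def add_shifted(a: list[int], b: list[int]) -> list[int]:
--     c = [0] + b
--     n = max(len(a), len(c))
--     out = []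
--     for i in range(n - 1, -1, -1):
--         s = (a[i] if i < len(a) else 0) + (c[i] if i < len(c) else 0)
--         if out or s != 0:
--             out.append(s)
--     out.reverse()
--     return out or [0]
-- ===== Notes on version B (the rewrite author's own statement) =====
-- stated objective: alternative
-- what changed: B walks the index range once from the top end downward, computing each shifted sum on the fly and suppressing it while the accumulator is still empty and the sum is zero, so trimming is fused into construction; A preallocates a zero array, scatter-adds with two forward index loops, and then trims with a separate pop loop.
import Mathlib
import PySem

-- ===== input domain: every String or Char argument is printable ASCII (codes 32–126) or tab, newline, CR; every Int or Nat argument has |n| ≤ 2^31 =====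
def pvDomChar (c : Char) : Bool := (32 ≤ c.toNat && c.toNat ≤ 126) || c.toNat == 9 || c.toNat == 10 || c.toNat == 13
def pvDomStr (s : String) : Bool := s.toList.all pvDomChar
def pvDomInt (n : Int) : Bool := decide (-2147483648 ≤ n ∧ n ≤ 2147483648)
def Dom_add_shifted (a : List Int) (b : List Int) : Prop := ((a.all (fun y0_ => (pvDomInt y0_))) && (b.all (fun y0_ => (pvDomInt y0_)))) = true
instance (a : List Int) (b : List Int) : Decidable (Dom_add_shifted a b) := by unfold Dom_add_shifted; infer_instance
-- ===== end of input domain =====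

-- B walks the index range once from the top end downward, computing each shifted sum
-- on the fly and suppressing it while the accumulator is empty and the sum is zero
-- (trimming fused into construction), instead of A's preallocated zero array with two
-- forward scatter-add loops followed by a separate pop loop (objective: alternative).


-- ===== PORT A =====
-- `for i, v in enumerate(xs): out[i0+i] += v` (i0 = 0 for a, 1 for b)
def scatterA : List Int → Nat → List Int → List Int
  | [], _, o => o
  | v :: vs, i, o => scatterA vs (i + 1) (o.set i (o.getD i 0 + v))

-- `while len(out) > 1 and out[-1] == 0: out.pop()`
def trimA (o : List Int) : List Int :=
  if _h : o.length > 1 ∧ o.getLast? = some 0 then trimA o.dropLast else o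
termination_by o.length
decreasing_by simp only [List.length_dropLast]; omega

def add_shifted (a : List Int) (b : List Int) : List Int :=
  let size := max a.length (b.length + 1)
  trimA (scatterA b 1 (scatterA a 0 (List.replicate size (0 : Int))))

-- ===== PORT B =====
-- `for i in range(n-1, -1, -1): s = ...; if out or s != 0: out.append(s)`
def goB (a c : List Int) : Nat → List Int → List Int
  | 0, out => out
  | i + 1, out =>
      let s := a.getD i 0 + c.getD i 0
      goB a c i (if out ≠ [] ∨ s ≠ 0 then out ++ [s] else out)

-- c = [0] + b; n = max(len(a), len(c)); reverse-index loop; out.reverse(); out or [0]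
def add_shifted_alt (a : List Int) (b : List Int) : List Int :=
  let c := (0 : Int) :: b
  let n := max a.length c.length
  let out := goB a c n []
  let r := out.reverse
  if r = [] then [0] else r

-- ===== PRECONDITION & SPEC =====
def Spec_add_shifted (a : List Int) (b : List Int) (out : List Int) : Prop := out = add_shifted_alt a b
instance (a : List Int) (b : List Int) (out : List Int) : Decidable (Spec_add_shifted a b out) := by unfold Spec_add_shifted; infer_instance

-- ===== CLAIM (what is proved, stated in full; the proofs are below) =====
def Claim_equal_add_shifted : Prop := ∀ (a : List Int) (b : List Int), Dom_add_shifted a b → Spec_add_shifted a b (add_shifted a b)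

-- ===== LEMMAS AND PROOFS =====

theorem scatterA_length (xs : List Int) (i : Nat) (o : List Int) :
    (scatterA xs i o).length = o.length := by
  induction xs generalizing i o with
  | nil => rfl
  | cons v vs ih => simp [scatterA, ih]

theorem getElem?_eq_ite_getD (xs : List Int) (j : Nat) :
    xs[j]? = if j < xs.length then some (xs.getD j 0) else none := by
  by_cases hj : j < xs.length
  · rw [if_pos hj, List.getElem?_eq_getElem hj, List.getD_eq_getElem _ _ hj]
  · rw [if_neg hj, List.getElem?_eq_none_iff.mpr (by omega)]

theorem scatterA_getD (xs : List Int) (i : Nat) (o : List Int)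
    (h : i + xs.length ≤ o.length) (j : Nat) :
    (scatterA xs i o).getD j 0 =
      o.getD j 0 + (if i ≤ j ∧ j < i + xs.length then xs.getD (j - i) 0 else 0) := by
  induction xs generalizing i o with
  | nil => simp [scatterA]
  | cons v vs ih =>
    simp only [scatterA]
    rw [ih _ _ (by simp at h ⊢; omega)]
    have hset : ∀ k : Nat, (o.set i (o.getD i 0 + v)).getD k 0 =
        if i = k then o.getD i 0 + v else o.getD k 0 := by
      intro k
      simp only [List.getD_eq_getElem?_getD, List.getElem?_set]
      by_cases hk : i = k
      · subst hk
        simp [show i < o.length by simp at h; omega]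
      · simp [hk]
    rw [hset]
    by_cases hj : j = i
    · subst hj
      rw [if_pos rfl, if_neg (by omega), if_pos (by simp)]
      simp
    · rw [if_neg (fun h' => hj h'.symm)]
      have h1 : (i + 1 ≤ j ∧ j < i + 1 + vs.length) ↔ (i ≤ j ∧ j < i + (v :: vs).length) := by
        simp; omega
      by_cases hc : i + 1 ≤ j ∧ j < i + 1 + vs.length
      · have hc' := h1.mp hc
        rw [if_pos hc, if_pos hc']
        have : j - i = (j - (i + 1)) + 1 := by omega
        simp [this]
      · rw [if_neg hc, if_neg (fun h' => hc (h1.mpr h'))]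

-- getD is 0 outside the range, so the scatter conditions collapse to plain getD.
theorem getD_eq_zero_of_le (xs : List Int) (j : Nat) (h : xs.length ≤ j) :
    xs.getD j 0 = 0 := by
  simp [List.getD_eq_getElem?_getD, List.getElem?_eq_none_iff.mpr h]

-- A's filled array is the list of shifted sums, indexwise.
theorem pretrim_eq (a b : List Int) :
    scatterA b 1 (scatterA a 0 (List.replicate (max a.length (b.length + 1)) (0 : Int))) =
      (List.range (max a.length (b.length + 1))).map
        (fun j => a.getD j 0 + ((0 : Int) :: b).getD j 0) := by
  set n := max a.length (b.length + 1) with hn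
  have hlen1 : (scatterA a 0 (List.replicate n (0 : Int))).length = n := by
    simp [scatterA_length]
  apply List.ext_getElem?
  intro j
  rw [List.getElem?_map]
  by_cases hj : j < n
  · rw [getElem?_eq_ite_getD, if_pos (by simp [scatterA_length, hlen1, hj]),
      List.getElem?_eq_getElem (by simpa using hj)]
    simp only [List.getElem_range, Option.map_some]
    congr 1
    rw [scatterA_getD _ _ _ (by rw [hlen1, hn]; omega) j,
      scatterA_getD _ _ _ (by rw [List.length_replicate, hn]; omega) j]
    have hrep : (List.replicate n (0 : Int)).getD j 0 = 0 := by
      simp [List.getD_eq_getElem?_getD, hj]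
    rw [hrep, zero_add]
    have hA : (if 0 ≤ j ∧ j < 0 + a.length then a.getD (j - 0) 0 else 0) = a.getD j 0 := by
      by_cases h : j < a.length
      · rw [if_pos ⟨Nat.zero_le _, by omega⟩]; simp
      · rw [if_neg (by omega), getD_eq_zero_of_le _ _ (by omega)]
    have hB : (if 1 ≤ j ∧ j < 1 + b.length then b.getD (j - 1) 0 else 0)
        = ((0 : Int) :: b).getD j 0 := by
      cases j with
      | zero => simp
      | succ j' =>
        simp only [List.getD_cons_succ, Nat.add_sub_cancel]
        by_cases h : j' < b.length
        · rw [if_pos ⟨by omega, by omega⟩]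
        · rw [if_neg (by omega), getD_eq_zero_of_le _ _ (by omega)]
    rw [hA, hB]
  · rw [List.getElem?_eq_none_iff.mpr (by simp [scatterA_length, hlen1]; omega),
      List.getElem?_eq_none_iff.mpr (by simpa using hj)]
    rfl

-- A's pop loop, seen from the reversed list.
theorem trimA_rev (r : List Int) (hr : r ≠ []) :
    trimA r.reverse =
      if r.dropWhile (fun v => v == 0) = [] then [(0 : Int)]
      else (r.dropWhile (fun v => v == 0)).reverse := by
  induction r with
  | nil => exact absurd rfl hr
  | cons x rest ih =>
    rw [trimA]
    simp only [List.getLast?_reverse, List.head?_cons, List.length_reverse, List.length_cons]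
    by_cases hx : x = 0
    · subst hx
      by_cases hrest : rest = []
      · subst hrest
        rw [dif_neg (by simp)]
        simp [List.dropWhile]
      · rw [dif_pos ⟨by have := List.length_pos_iff.mpr hrest; omega, rfl⟩]
        rw [List.dropLast_reverse]
        simp only [List.tail_cons]
        rw [ih hrest]
        simp [List.dropWhile]
    · rw [dif_neg (by simp [hx])]
      have hxf : (fun v => v == (0:Int)) x = false := by simp [hx]
      simp [List.dropWhile, hxf]

-- Once something has been appended, B's loop appends every remaining sum.
theorem goB_nonempty (a c : List Int) (i : Nat) (out : List Int) (h : out ≠ []) :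
    goB a c i out = out ++ ((List.range i).map (fun j => a.getD j 0 + c.getD j 0)).reverse := by
  induction i generalizing out with
  | zero => simp [goB]
  | succ i ih =>
    simp only [goB]
    rw [if_pos (Or.inl h), ih _ (by simp)]
    simp [List.range_succ]

-- From the empty accumulator, B's loop is dropWhile-zero on the descending sums.
theorem goB_nil (a c : List Int) (i : Nat) :
    goB a c i [] =
      (((List.range i).map (fun j => a.getD j 0 + c.getD j 0)).reverse).dropWhile
        (fun v => v == 0) := by
  induction i with
  | zero => simp [goB]
  | succ i ih =>
    have hstep : (((List.range (i + 1)).map (fun j => a.getD j 0 + c.getD j 0)).reverse)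
        = (a.getD i 0 + c.getD i 0)
            :: ((List.range i).map (fun j => a.getD j 0 + c.getD j 0)).reverse := by
      rw [List.range_succ]; simp
    simp only [goB]
    by_cases hs : a.getD i 0 + c.getD i 0 = 0
    · rw [if_neg (by simpa using hs), ih, hstep,
        List.dropWhile_cons_of_pos (by simpa using hs)]
    · rw [if_pos (Or.inr hs), goB_nonempty _ _ _ _ (by simp), hstep,
        List.dropWhile_cons_of_neg (by simpa using hs)]
      simp

-- ===== VERDICT (by name: the statement is the Claim_ definition above) =====
theorem add_shifted_spec : Claim_equal_add_shifted := by
  intro a b _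
  unfold Spec_add_shifted add_shifted add_shifted_alt
  simp only [List.length_cons]
  rw [pretrim_eq]
  set n := max a.length (b.length + 1) with hn
  set sums := (List.range n).map (fun j => a.getD j 0 + ((0 : Int) :: b).getD j 0) with hs
  have hne : sums ≠ [] := by
    rw [hs, ← List.length_pos_iff]
    simp [hn]
  have htr := trimA_rev sums.reverse (by simpa using hne)
  rw [List.reverse_reverse] at htr
  rw [htr, goB_nil]
  rw [← hs]
  by_cases h0 : sums.reverse.dropWhile (fun v => v == 0) = []
  · simp [h0]
  · simp [h0]
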